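-- pv_equiv track=rewrite | github.com/terry-repos/py-sparQL | src/pyutils/str_utils.py | insert_char_at_pos
-- ===== SOURCE A (Python) =====
-- def insert_char_at_pos(strToManip=None, charToInsert ='_' , poses=None, indexI=0) :
--
-- 	if len(poses) > 0 :
--
-- 		pos = poses.pop(0)
-- 		if pos > 0:
-- 			outStr = strToManip[:(pos+indexI)] + charToInsert + strToManip[(pos+indexI):]
-- 			indexI+=1
-- 			strToManip = insert_char_at_pos(outStr, charToInsert, poses, indexI)
--
-- 	return strToManip.upper()
-- ===== SOURCE B (Python) =====
-- def insert_char_at_pos(strToManip=None, charToInsert='_', poses=None, indexI=0):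
--     chars = list(strToManip)
--     ins = list(charToInsert)
--     for off, pos in enumerate(poses):
--         if pos <= 0:
--             break
--         i = pos + indexI + off
--         chars[i:i] = ins
--     return ''.join(chars).upper()
-- ===== Notes on version B (the rewrite author's own statement) =====
-- stated objective: alternative
-- what changed: Replaced A's recursion, which pops from poses and re-uppercases the whole string at every level with three string concatenations per step, by one iterative enumerate loop splicing into a mutable char list with a single join+upper at the end; it trades recursion (and its depth limit) for a flat loop at similar asymptotic cost.
import Mathlib
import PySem

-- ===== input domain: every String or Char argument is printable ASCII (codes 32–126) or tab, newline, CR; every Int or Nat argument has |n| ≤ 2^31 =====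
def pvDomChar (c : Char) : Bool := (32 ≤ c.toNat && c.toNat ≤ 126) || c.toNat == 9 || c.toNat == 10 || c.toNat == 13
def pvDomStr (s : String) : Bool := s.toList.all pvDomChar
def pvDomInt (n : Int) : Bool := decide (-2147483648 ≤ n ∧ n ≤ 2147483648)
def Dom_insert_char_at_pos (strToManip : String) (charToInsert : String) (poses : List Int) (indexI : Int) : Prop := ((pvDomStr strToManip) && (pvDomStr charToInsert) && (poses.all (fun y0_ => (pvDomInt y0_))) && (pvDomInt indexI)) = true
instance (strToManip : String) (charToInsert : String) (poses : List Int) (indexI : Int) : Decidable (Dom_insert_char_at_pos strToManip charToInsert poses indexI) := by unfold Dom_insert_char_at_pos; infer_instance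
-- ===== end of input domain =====

-- B replaces A's recursion (one slice-concat + a full .upper() per position, depth = #positions)
-- by one iterative splice loop over a char list with a single final upper — same return value at
-- similar cost; note A also pops the processed prefix from `poses` in place, which B does not
-- (the equivalence proved here is about the RETURN value only).

-- ===== PORT A =====
def insert_char_at_pos (strToManip : String) (charToInsert : String) (poses : List Int) (indexI : Int) : String :=
  match poses with
  | [] => PySem.Str.upper strToManip
  | pos :: rest =>
    if pos > 0 then
      let outStr := PySem.Str.slice strToManip none (some (pos + indexI)) ++ charToInsert
        ++ PySem.Str.slice strToManip (some (pos + indexI)) none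
      PySem.Str.upper (insert_char_at_pos outStr charToInsert rest (indexI + 1))
    else PySem.Str.upper strToManip

-- ===== PORT B =====
-- chars[i:i] = ins  (Python list slice assignment: clamped splice)
def icpSplice (chars : List Char) (i : Int) (ins : List Char) : List Char :=
  PySem.List.slice chars none (some i) ++ ins ++ PySem.List.slice chars (some i) none

-- the `for off, pos in enumerate(poses)` loop with its break
def icpLoop (chars ins : List Char) (poses : List Int) (base : Int) (off : Nat) : List Char :=
  match poses with
  | [] => chars
  | pos :: rest =>
    if pos ≤ 0 then chars
    else icpLoop (icpSplice chars (pos + base + (off : Int)) ins) ins rest base (off + 1)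

def insert_char_at_pos_alt (strToManip : String) (charToInsert : String) (poses : List Int) (indexI : Int) : String :=
  PySem.Str.upper (String.ofList (icpLoop strToManip.toList charToInsert.toList poses indexI 0))

-- ===== PRECONDITION & SPEC =====
def Spec_insert_char_at_pos (strToManip : String) (charToInsert : String) (poses : List Int) (indexI : Int) (out : String) : Prop := out = insert_char_at_pos_alt strToManip charToInsert poses indexI
instance (strToManip : String) (charToInsert : String) (poses : List Int) (indexI : Int) (out : String) : Decidable (Spec_insert_char_at_pos strToManip charToInsert poses indexI out) := by unfold Spec_insert_char_at_pos; infer_instance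

-- ===== CLAIM (what is proved, stated in full; the proofs are below) =====
def Claim_equal_insert_char_at_pos : Prop := ∀ (strToManip : String) (charToInsert : String) (poses : List Int) (indexI : Int), Dom_insert_char_at_pos strToManip charToInsert poses indexI → Spec_insert_char_at_pos strToManip charToInsert poses indexI (insert_char_at_pos strToManip charToInsert poses indexI)

-- ===== LEMMAS AND PROOFS =====
theorem upperChar_idem (c : Char) :
    PySem.Chars.upperChar (PySem.Chars.upperChar c) = PySem.Chars.upperChar c := by
  unfold PySem.Chars.upperChar PySem.Chars.islower
  by_cases h1 : 'a' ≤ c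
  · by_cases h2 : c ≤ 'z'
    · have hc1 : (97 : Nat) ≤ c.toNat := h1
      have hc2 : c.toNat ≤ 122 := h2
      have hv : (c.toNat - 32).isValidChar := by left; omega
      have hna : ¬ ('a' ≤ Char.ofNat (c.toNat - 32)) := by
        intro hle
        have h97 : (97 : Nat) ≤ (Char.ofNat (c.toNat - 32)).toNat := hle
        rw [Char.toNat_ofNat, if_pos hv] at h97
        omega
      simp only [h1, h2, decide_true, Bool.and_self, if_true, hna, decide_false,
        Bool.false_and, Bool.false_eq_true, if_false]
    · simp [h2]
  · simp [h1]

theorem strUpper_idem (s : String) : PySem.Str.upper (PySem.Str.upper s) = PySem.Str.upper s := by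
  apply String.toList_injective
  simp [PySem.Str.toList_upper, PySem.Chars.upper, List.map_map, Function.comp, upperChar_idem]

theorem icp_main (poses : List Int) : ∀ (s cti : String) (base : Int) (off : Nat),
    insert_char_at_pos s cti poses (base + (off : Int))
      = PySem.Str.upper (String.ofList (icpLoop s.toList cti.toList poses base off)) := by
  induction poses with
  | nil =>
    intro s cti base off
    simp [insert_char_at_pos, icpLoop]
  | cons pos rest ih =>
    intro s cti base off
    by_cases hp : pos > 0
    · have hnle : ¬ pos ≤ 0 := by omega
      simp only [insert_char_at_pos, icpLoop, if_pos hp, if_neg hnle]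
      have hout : (PySem.Str.slice s none (some (pos + (base + (off : Int)))) ++ cti
            ++ PySem.Str.slice s (some (pos + (base + (off : Int)))) none).toList
          = icpSplice s.toList (pos + base + (off : Int)) cti.toList := by
        simp [icpSplice, String.toList_append, PySem.Str.toList_slice,
          PySem.Chars.slice_eq_listSlice]
        rw [show pos + (base + (off : Int)) = pos + base + (off : Int) from by ring]
      have harg : base + (off : Int) + 1 = base + ((off + 1 : Nat) : Int) := by push_cast; ring
      rw [harg, ih _ cti base (off + 1), strUpper_idem, hout]
    · have hle : pos ≤ 0 := by omega
      simp [insert_char_at_pos, icpLoop, if_neg hp, if_pos hle]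

-- ===== VERDICT (by name: the statement is the Claim_ definition above) =====
theorem insert_char_at_pos_spec : Claim_equal_insert_char_at_pos := by
  intro s cti poses indexI _
  unfold Spec_insert_char_at_pos insert_char_at_pos_alt
  have := icp_main poses s cti indexI 0
  simpa using this
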